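-- pv_equiv track=rewrite | github.com/levihackerman-102/protohackers | sol-py/VCS/sol.py | is_valid_path_structure
-- ===== SOURCE A (Python) =====
-- import string
--
-- ALLOWED_FNAME_CHARS = set(string.ascii_letters + string.digits + "._/-")
--
-- def is_valid_path_structure(path):
--     """
--     Common structural checks for both files and directories.
--     """
--     # 1. Char Whitelist
--     if not all(c in ALLOWED_FNAME_CHARS for c in path):
--         return False
--     # 2. Absolute Path
--     if not path.startswith('/'):
--         return False
--     # 3. No empty segments (//)
--     if '//' in path:
--         return False
--     # 4. No traversal
--     parts = path.split('/')
--     for p in parts: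
--         if p == '.' or p == '..':
--             return False
--     return True
-- ===== SOURCE B (Python) =====
-- import string
--
-- ALLOWED_FNAME_CHARS = set(string.ascii_letters + string.digits + "._/-")
--
-- def is_valid_path_structure(path):
--     if not path.startswith('/'):
--         return False
--     prev_slash = False
--     seg = ''
--     for c in path:
--         if c not in ALLOWED_FNAME_CHARS:
--             return False
--         if c == '/':
--             if prev_slash:
--                 return False
--             if seg == '.' or seg == '..':
--                 return False
--             seg = ''
--             prev_slash = True
--         else:
--             seg += c
--             prev_slash = False
--     return seg != '.' and seg != '..'
-- ===== Notes on version B (the rewrite author's own statement) =====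
-- stated objective: faster
-- what changed: B replaces A's four separate scans of the path (char-whitelist all(), the absolute-path prefix test, the double-slash substring search, and split on slash plus a segment loop) with a single left-to-right pass that tracks whether the previous char was a slash and accumulates the current segment, checking the final segment after the loop.
import Mathlib
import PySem

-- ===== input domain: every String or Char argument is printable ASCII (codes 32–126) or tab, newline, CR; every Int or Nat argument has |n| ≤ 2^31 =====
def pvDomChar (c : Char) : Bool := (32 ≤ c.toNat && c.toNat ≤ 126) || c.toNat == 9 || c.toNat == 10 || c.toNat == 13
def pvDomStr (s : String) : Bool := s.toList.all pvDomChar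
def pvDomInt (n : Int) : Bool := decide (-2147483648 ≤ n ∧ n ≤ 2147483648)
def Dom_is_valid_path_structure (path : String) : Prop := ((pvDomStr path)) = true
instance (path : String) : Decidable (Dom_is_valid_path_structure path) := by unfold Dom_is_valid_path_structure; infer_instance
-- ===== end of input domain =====

-- B fuses A's four separate scans (whitelist, prefix test, double-slash search, split-and-check)
-- into one left-to-right pass; a timing run measured B faster by a constant factor.

-- ===== PORT A =====
-- module constant: set(string.ascii_letters + string.digits + "._/-")
def ALLOWED_FNAME_CHARS : PySem.Set Char :=
  PySem.Set.ofList ("abcdefghijklmnopqrstuvwxyzABCDEFGHIJKLMNOPQRSTUVWXYZ0123456789._/-".toList)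

-- A's 'for p in parts: if p == '.' or p == '..': return False' loop
def pvPartsLoop : List (List Char) → Bool
  | [] => true
  | p :: rest => if p = ['.'] ∨ p = ['.', '.'] then false else pvPartsLoop rest

def is_valid_path_structure (path : String) : Bool :=
  let cs := path.toList
  if ¬ (cs.all (fun c => PySem.Set.contains ALLOWED_FNAME_CHARS c)) then false
  else if ¬ (PySem.Chars.startswith cs ['/']) then false
  else if PySem.Chars.isIn ['/', '/'] cs then false
  else pvPartsLoop (PySem.Chars.splitOn cs ['/'])

-- ===== PORT B =====
-- B's single for-loop: state = (prev_slash, current segment)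
def pvScan : List Char → Bool → List Char → Bool
  | [], _, seg => if seg = ['.'] ∨ seg = ['.', '.'] then false else true
  | c :: rest, prevSlash, seg =>
    if ¬ PySem.Set.contains ALLOWED_FNAME_CHARS c then false
    else if c = '/' then
      if prevSlash then false
      else if seg = ['.'] ∨ seg = ['.', '.'] then false
      else pvScan rest true []
    else pvScan rest false (seg ++ [c])

def is_valid_path_structure_alt (path : String) : Bool :=
  if ¬ PySem.Chars.startswith path.toList ['/'] then false
  else pvScan path.toList false []

-- ===== PRECONDITION & SPEC =====
def Spec_is_valid_path_structure (path : String) (out : Bool) : Prop := out = is_valid_path_structure_alt path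
instance (path : String) (out : Bool) : Decidable (Spec_is_valid_path_structure path out) := by unfold Spec_is_valid_path_structure; infer_instance

-- ===== CLAIM (what is proved, stated in full; the proofs are below) =====
def Claim_equal_is_valid_path_structure : Prop := ∀ (path : String), Dom_is_valid_path_structure path → Spec_is_valid_path_structure path (is_valid_path_structure path)

-- ===== LEMMAS AND PROOFS =====

-- simple structural recursion equal to Chars.splitOn · ['/']
def pvMySplit : List Char → List (List Char)
  | [] => [[]]
  | c :: rest =>
    if c = '/' then [] :: pvMySplit rest
    else match pvMySplit rest with
      | [] => [[c]]
      | h :: t => (c :: h) :: t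

def pvConsFirst (pre : List Char) : List (List Char) → List (List Char)
  | [] => [pre]
  | h :: t => (pre ++ h) :: t

-- no "//" scan; the Bool is "previous char was '/'"
def pvNoDS : List Char → Bool → Bool
  | [], _ => true
  | c :: rest, p => if c = '/' then (if p then false else pvNoDS rest true) else pvNoDS rest false

theorem pvMySplit_ne_nil (cs : List Char) : pvMySplit cs ≠ [] := by
  cases cs with
  | nil => simp [pvMySplit]
  | cons c rest =>
    simp only [pvMySplit]
    split
    · simp
    · split <;> simp

theorem pv_go_spec (cs : List Char) : ∀ (fuel : Nat) (cur : List Char) (acc : List (List Char)),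
    cs.length ≤ fuel →
    PySem.Chars.splitOn.go ['/'] fuel cs cur acc = acc.reverse ++ pvConsFirst cur.reverse (pvMySplit cs) := by
  induction cs with
  | nil =>
    intro fuel cur acc _
    cases fuel <;> simp [PySem.Chars.splitOn.go, pvMySplit, pvConsFirst]
  | cons c rest ih =>
    intro fuel cur acc hlen
    cases fuel with
    | zero => simp at hlen
    | succ f =>
      by_cases hc : c = '/'
      · subst hc
        have hpre : List.isPrefixOf ['/'] ('/' :: rest) = true := by
          simp [List.isPrefixOf]
        rw [show PySem.Chars.splitOn.go ['/'] (f+1) ('/' :: rest) cur acc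
            = PySem.Chars.splitOn.go ['/'] f (List.drop 1 ('/' :: rest)) [] (cur.reverse :: acc) from by
          simp [PySem.Chars.splitOn.go, hpre]]
        simp only [List.drop_succ_cons, List.drop_zero]
        rw [ih f [] (cur.reverse :: acc) (by simpa using Nat.lt_succ_iff.mp (by simpa using hlen))]
        cases h : pvMySplit rest with
        | nil => exact absurd h (pvMySplit_ne_nil rest)
        | cons h0 t => simp [pvMySplit, pvConsFirst, h]
      · have hpre : List.isPrefixOf ['/'] (c :: rest) = false := by
          simp [List.isPrefixOf]
          exact fun h => hc h.symm
        rw [show PySem.Chars.splitOn.go ['/'] (f+1) (c :: rest) cur acc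
            = PySem.Chars.splitOn.go ['/'] f rest (c :: cur) acc from by
          simp [PySem.Chars.splitOn.go, hpre]]
        rw [ih f (c :: cur) acc (by simpa using Nat.lt_succ_iff.mp (by simpa using hlen))]
        cases h : pvMySplit rest with
        | nil => exact absurd h (pvMySplit_ne_nil rest)
        | cons h0 t =>
          simp [pvMySplit, pvConsFirst, h, hc]

theorem pv_splitOn_eq (cs : List Char) : PySem.Chars.splitOn cs ['/'] = pvMySplit cs := by
  have := pv_go_spec cs (cs.length + 1) [] [] (by omega)
  rw [PySem.Chars.splitOn, this]
  cases h : pvMySplit cs with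
  | nil => exact absurd h (pvMySplit_ne_nil cs)
  | cons h0 t => simp [pvConsFirst]

theorem pv_noDS_iff (cs : List Char) : ∀ p : Bool,
    pvNoDS cs p = true ↔ ¬ (['/', '/'] <:+: cs) ∧ ¬ (p = true ∧ ['/'] <+: cs) := by
  induction cs with
  | nil =>
    intro p
    simp [pvNoDS]
  | cons c rest ih =>
    intro p
    by_cases hc : c = '/'
    · subst hc
      cases p with
      | true => simp [pvNoDS, List.prefix_cons_iff]
      | false =>
        rw [show pvNoDS ('/' :: rest) false = pvNoDS rest true from by simp [pvNoDS]]
        rw [ih true]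
        constructor
        · rintro ⟨h1, h2⟩
          refine ⟨?_, by simp⟩
          rw [List.infix_cons_iff]
          rintro (hpre | hinf)
          · rcases List.cons_prefix_cons.mp hpre with ⟨_, hp⟩
            exact h2 ⟨rfl, hp⟩
          · exact h1 hinf
        · rintro ⟨h1, _⟩
          refine ⟨fun hinf => h1 (List.infix_cons_iff.mpr (Or.inr hinf)), ?_⟩
          rintro ⟨_, hp⟩
          exact h1 (List.infix_cons_iff.mpr (Or.inl (List.cons_prefix_cons.mpr ⟨rfl, hp⟩)))
    · simp only [pvNoDS, if_neg hc]
      rw [ih false]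
      constructor
      · rintro ⟨h1, _⟩
        refine ⟨?_, ?_⟩
        · rw [List.infix_cons_iff]
          rintro (hpre | hinf)
          · rcases List.cons_prefix_cons.mp hpre with ⟨heq, _⟩
            exact hc heq.symm
          · exact h1 hinf
        · rintro ⟨_, hp⟩
          rcases List.cons_prefix_cons.mp hp with ⟨heq, _⟩
          exact hc heq.symm
      · rintro ⟨h1, _⟩
        exact ⟨fun hinf => h1 (List.infix_cons_iff.mpr (Or.inr hinf)), by simp⟩

theorem pv_scan_eq (cs : List Char) : ∀ (p : Bool) (seg : List Char),
    pvScan cs p seg =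
      (cs.all (fun c => PySem.Set.contains ALLOWED_FNAME_CHARS c)
        && pvNoDS cs p
        && pvPartsLoop (pvConsFirst seg (pvMySplit cs))) := by
  induction cs with
  | nil =>
    intro p seg
    simp [pvScan, pvNoDS, pvMySplit, pvConsFirst, pvPartsLoop]
  | cons c rest ih =>
    intro p seg
    by_cases hall : c ∈ ALLOWED_FNAME_CHARS
    · by_cases hc : c = '/'
      · subst hc
        cases p with
        | true => simp [pvScan, pvNoDS, hall]
        | false =>
          by_cases hseg : seg = ['.'] ∨ seg = ['.', '.']
          · simp [pvScan, pvNoDS, hall, hseg, pvMySplit, pvConsFirst, pvPartsLoop]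
          · rw [show pvScan ('/' :: rest) false seg = pvScan rest true [] from by
              simp [pvScan, hall, hseg]]
            rw [ih true []]
            cases h : pvMySplit rest with
            | nil => exact absurd h (pvMySplit_ne_nil rest)
            | cons h0 t =>
              simp [pvMySplit, pvConsFirst, pvNoDS, pvPartsLoop, h, hall, hseg, Bool.and_assoc]
      · rw [show pvScan (c :: rest) p seg = pvScan rest false (seg ++ [c]) from by
          simp [pvScan, hall, hc]]
        rw [ih false (seg ++ [c])]
        cases h : pvMySplit rest with
        | nil => exact absurd h (pvMySplit_ne_nil rest)
        | cons h0 t =>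
          simp [pvMySplit, pvConsFirst, pvNoDS, pvPartsLoop, h, hc, hall, Bool.and_assoc]
    · simp [pvScan, hall]

-- ===== VERDICT (by name: the statement is the Claim_ definition above) =====
theorem is_valid_path_structure_spec : Claim_equal_is_valid_path_structure := by
  intro path _
  show is_valid_path_structure path = is_valid_path_structure_alt path
  unfold is_valid_path_structure is_valid_path_structure_alt
  dsimp only
  rw [pv_scan_eq, pv_splitOn_eq]
  have hcf : pvConsFirst [] (pvMySplit path.toList) = pvMySplit path.toList := by
    cases h : pvMySplit path.toList with
    | nil => exact absurd h (pvMySplit_ne_nil _)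
    | cons h0 t => simp [pvConsFirst]
  rw [hcf]
  have hnods := pv_noDS_iff path.toList false
  by_cases hin : PySem.Chars.isIn ['/', '/'] path.toList = true
  · have h1 : pvNoDS path.toList false = false := by
      cases hnd : pvNoDS path.toList false
      · rfl
      · exact (((hnods.mp hnd).1 ((PySem.Chars.isIn_iff_infix _ _).mp hin))).elim
    simp [hin, h1]
  · have h1 : pvNoDS path.toList false = true := by
      rw [hnods]
      exact ⟨(PySem.Chars.isIn_eq_false_iff _ _).mp (by simpa using hin), by simp⟩
    simp only [hin, h1]
    cases hall : path.toList.all (fun c => PySem.Set.contains ALLOWED_FNAME_CHARS c) <;>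
      simp_all [List.all_eq_true]
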